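-- pv_equiv track=rewrite | github.com/aabarbosa/Python | .py/122.py | quantos_comeram
-- ===== SOURCE A (Python) =====
-- def quantos_comeram(n_feijoadas, fila):
-- 	contador = 0
-- 	for group in fila:
-- 		if n_feijoadas - group >= 0:
-- 			contador += group
-- 			n_feijoadas -= group
-- 		else:
-- 			return contador
-- 	return contador
-- ===== SOURCE B (Python) =====
-- def quantos_comeram(n_feijoadas, fila):
--     if not fila or fila[0] > n_feijoadas:
--         return 0
--     return fila[0] + quantos_comeram(n_feijoadas - fila[0], fila[1:])
-- ===== Notes on version B (the rewrite author's own statement) =====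
-- stated objective: simpler
-- what changed: Replaced the iterative loop with a mutable counter and remaining-capacity variable by a pure structural recursion with no accumulator: the base case returns 0 and the sum is built on the way out of the recursion.
import Mathlib
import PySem

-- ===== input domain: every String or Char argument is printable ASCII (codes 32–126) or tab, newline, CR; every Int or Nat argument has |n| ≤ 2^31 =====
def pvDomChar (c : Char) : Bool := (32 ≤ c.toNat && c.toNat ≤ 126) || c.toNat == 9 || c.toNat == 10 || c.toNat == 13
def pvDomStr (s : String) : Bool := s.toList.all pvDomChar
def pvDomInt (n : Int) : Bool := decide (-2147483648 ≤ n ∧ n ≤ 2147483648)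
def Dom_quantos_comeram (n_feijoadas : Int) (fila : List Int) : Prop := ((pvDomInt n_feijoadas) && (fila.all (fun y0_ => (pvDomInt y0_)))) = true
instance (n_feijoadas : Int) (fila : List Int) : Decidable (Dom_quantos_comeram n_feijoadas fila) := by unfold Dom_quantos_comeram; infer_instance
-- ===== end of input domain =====

-- B (objective: simpler): pure structural recursion with no accumulator; the sum is built
-- on the way out of the recursion instead of in a mutable counter.

-- ===== PORT A =====
-- the for-loop over fila with mutable contador / n_feijoadas, early return on the else branch
def qcGo (n_feijoadas : Int) (fila : List Int) (contador : Int) : Int :=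
  match fila with
  | [] => contador
  | group :: rest =>
      if n_feijoadas - group ≥ 0 then
        qcGo (n_feijoadas - group) rest (contador + group)
      else
        contador

def quantos_comeram (n_feijoadas : Int) (fila : List Int) : Int :=
  qcGo n_feijoadas fila 0

-- ===== PORT B =====
def quantos_comeram_alt (n_feijoadas : Int) (fila : List Int) : Int :=
  match fila with
  | [] => 0
  | g :: rest =>
      if g > n_feijoadas then 0
      else g + quantos_comeram_alt (n_feijoadas - g) rest

-- ===== PRECONDITION & SPEC =====
def Spec_quantos_comeram (n_feijoadas : Int) (fila : List Int) (out : Int) : Prop := out = quantos_comeram_alt n_feijoadas fila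
instance (n_feijoadas : Int) (fila : List Int) (out : Int) : Decidable (Spec_quantos_comeram n_feijoadas fila out) := by unfold Spec_quantos_comeram; infer_instance

-- ===== CLAIM (what is proved, stated in full; the proofs are below) =====
def Claim_equal_quantos_comeram : Prop := ∀ (n_feijoadas : Int) (fila : List Int), Dom_quantos_comeram n_feijoadas fila → Spec_quantos_comeram n_feijoadas fila (quantos_comeram n_feijoadas fila)

-- ===== LEMMAS AND PROOFS =====

theorem qcGo_eq (fila : List Int) : ∀ (n c : Int),
    qcGo n fila c = c + quantos_comeram_alt n fila := by
  induction fila with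
  | nil => intro n c; simp [qcGo, quantos_comeram_alt]
  | cons g rest ih =>
      intro n c
      simp only [qcGo, quantos_comeram_alt]
      by_cases h : n - g ≥ 0
      · rw [if_pos h, if_neg (by omega : ¬ g > n), ih (n - g) (c + g)]; ring
      · rw [if_neg h, if_pos (by omega : g > n)]; ring

-- ===== VERDICT (by name: the statement is the Claim_ definition above) =====
theorem quantos_comeram_spec : Claim_equal_quantos_comeram := by
  intro n fila _
  unfold Spec_quantos_comeram quantos_comeram
  simpa using qcGo_eq fila n 0
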